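-- pv_equiv track=rewrite | github.com/vikrantwiz02/riscv-isa-explorer | riscv_explorer/parser.py | group_by_raw_tag
-- ===== SOURCE A (Python) =====
-- from typing import TypedDict
--
-- class InstrEntry(TypedDict):
--     encoding: str
--     variable_fields: list[str]
--     extension: list[str]
--     match: str
--     mask: str
--
-- def group_by_raw_tag(
--     instr_dict: dict[str, InstrEntry],
-- ) -> dict[str, list[str]]:
--     """
--     Build a mapping from raw extension tag to sorted list of mnemonics.
--
--     This preserves the original tag names from the JSON (rv_zba, rv64_zba, etc.)
--     exactly as the source data records them.  An instruction with multiple tags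
--     (e.g., andn with rv_zbb, rv_zk, rv_zbkb, ...) appears in each tag's group.
--     """
--     groups: dict[str, list[str]] = {}
--     for mnemonic, entry in instr_dict.items():
--         for tag in entry.get("extension", []):
--             groups.setdefault(tag, []).append(mnemonic)
--     return dict(sorted({k: sorted(v) for k, v in groups.items()}.items()))
-- ===== SOURCE B (Python) =====
-- def group_by_raw_tag(instr_dict):
--     """Flatten to (tag, mnemonic) pairs, sort them once lexicographically, then
--     build the groups in a single run-scan over the sorted pairs: equal tags are
--     consecutive, so each run is one group and comes out with its mnemonics
--     already sorted and the runs' tags in ascending order."""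
--     pairs = sorted(
--         (tag, mnemonic)
--         for mnemonic, entry in instr_dict.items()
--         for tag in entry.get("extension", [])
--     )
--     runs = []
--     for tag, mnemonic in pairs:
--         if runs and runs[-1][0] == tag:
--             runs[-1][1].append(mnemonic)
--         else:
--             runs.append((tag, [mnemonic]))
--     return dict(runs)
-- ===== Notes on version B (the rewrite author's own statement) =====
-- stated objective: alternative
-- what changed: A groups mnemonics into a dict of lists via setdefault and then sorts every group and the items; B instead flattens the input to (tag, mnemonic) pairs, sorts those pairs once lexicographically, and cuts the sorted stream into groups with a single run-scan (comparing each pair's tag with the last run's tag), so no dict grouping and no per-group sorting happens.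
import Mathlib
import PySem

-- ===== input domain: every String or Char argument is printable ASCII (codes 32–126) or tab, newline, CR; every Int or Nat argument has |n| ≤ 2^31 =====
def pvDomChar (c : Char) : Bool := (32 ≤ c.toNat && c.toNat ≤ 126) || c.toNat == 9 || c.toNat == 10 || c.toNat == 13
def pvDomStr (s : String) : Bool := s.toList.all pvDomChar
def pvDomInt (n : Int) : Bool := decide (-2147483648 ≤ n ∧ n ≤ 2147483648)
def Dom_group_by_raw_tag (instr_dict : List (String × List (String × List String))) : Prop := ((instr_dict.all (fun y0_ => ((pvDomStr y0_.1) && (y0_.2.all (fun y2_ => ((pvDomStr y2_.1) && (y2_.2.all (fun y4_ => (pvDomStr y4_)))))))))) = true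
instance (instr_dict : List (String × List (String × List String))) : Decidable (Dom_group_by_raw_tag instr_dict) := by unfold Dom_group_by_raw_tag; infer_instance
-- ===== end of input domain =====

-- B replaces A's dict-of-lists grouping (+ per-group sort + sort of the items) by
-- flatten → one global lexicographic sort of (tag, mnemonic) pairs → a single run-scan
-- that cuts the sorted pairs into groups (objective: alternative).

-- ===== PORT A =====
-- entry.get("extension", []) — dict lookup with a default (shared by both ports)
def pyGetExtension (entry : List (String × List String)) : List String :=
  (PySem.Dict.mk entry).getD "extension" []

-- Python A: groups = {}; for mnemonic, entry in items: for tag in entry.get("extension", []):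
--   groups.setdefault(tag, []).append(mnemonic); return dict(sorted({k: sorted(v)}.items())).
-- Keys of groups are distinct, so Python's tuple comparison in sorted(...) never reaches the
-- second component: sorting the items by key is exact.
def group_by_raw_tag (instr_dict : List (String × List (String × List String))) : List (String × List String) :=
  let groups : PySem.Dict String (List String) :=
    instr_dict.foldl
      (fun g p =>
        (pyGetExtension p.2).foldl (fun g tag => g.modify tag [] (fun v => v ++ [p.1])) g)
      PySem.Dict.empty
  PySem.List.sorted
    (groups.items.map (fun kv => (kv.1, PySem.List.sorted kv.2 (fun x => x))))
    (fun kv => kv.1)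

-- ===== PORT B =====
-- Python B: pairs = sorted((tag, m) for m, entry in items for tag in entry.get("extension", []));
-- then one run-scan: `if runs and runs[-1][0] == tag: runs[-1][1].append(m) else: runs.append((tag, [m]))`;
-- return dict(runs).  sorted on 2-tuples is PySem.List.sorted2 (Python's lexicographic tuple order).
def group_by_raw_tag_alt (instr_dict : List (String × List (String × List String))) : List (String × List String) :=
  let pairs : List (String × String) :=
    instr_dict.flatMap (fun p => (pyGetExtension p.2).map (fun tag => (tag, p.1)))
  let spairs := PySem.List.sorted2 pairs (fun e => e.1) (fun e => e.2)
  let runs : List (String × List String) :=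
    spairs.foldl
      (fun runs e =>
        match runs.getLast? with
        | some last =>
            if last.1 == e.1 then runs.dropLast ++ [(last.1, last.2 ++ [e.2])]
            else runs ++ [(e.1, [e.2])]
        | none => runs ++ [(e.1, [e.2])])
      []
  (PySem.Dict.ofList runs).items

-- ===== PRECONDITION & SPEC =====
def Spec_group_by_raw_tag (instr_dict : List (String × List (String × List String))) (out : List (String × List String)) : Prop := out = group_by_raw_tag_alt instr_dict
instance (instr_dict : List (String × List (String × List String))) (out : List (String × List String)) : Decidable (Spec_group_by_raw_tag instr_dict out) := by unfold Spec_group_by_raw_tag; infer_instance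

-- ===== CLAIM (what is proved, stated in full; the proofs are below) =====
def Claim_equal_group_by_raw_tag : Prop := ∀ (instr_dict : List (String × List (String × List String))), Dom_group_by_raw_tag instr_dict → Spec_group_by_raw_tag instr_dict (group_by_raw_tag instr_dict)

-- ===== LEMMAS AND PROOFS =====

-- the flattened stream of (tag, mnemonic) events, in source order (A's loop order,
-- and also exactly B's `pairs` before sorting)
def pvEventsA (l : List (String × List (String × List String))) : List (String × String) :=
  l.flatMap (fun p => (pyGetExtension p.2).map (fun t => (t, p.1)))

-- A's inner loop body: groups.setdefault(tag, []).append(mnemonic)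
def pvStep (g : PySem.Dict String (List String)) (e : String × String) : PySem.Dict String (List String) :=
  g.modify e.1 [] (fun v => v ++ [e.2])

def pvValA (l : List (String × List (String × List String))) (t : String) : List String :=
  ((pvEventsA l).filter (fun e => e.1 == t)).map (fun e => e.2)

-- B's run-scan loop body
def pvRunStep (runs : List (String × List String)) (e : String × String) : List (String × List String) :=
  match runs.getLast? with
  | some last =>
      if last.1 == e.1 then runs.dropLast ++ [(last.1, last.2 ++ [e.2])]
      else runs ++ [(e.1, [e.2])]
  | none => runs ++ [(e.1, [e.2])]

-- what the run-scan of a key-sorted pair list produces: one group per distinct key,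
-- keys in first-occurrence order, each group the keyed values in stream order
def pvG (L : List (String × String)) : List (String × List String) :=
  (PySem.List.dedup (L.map (fun e => e.1))).map
    (fun k => (k, (L.filter (fun e => e.1 == k)).map (fun e => e.2)))

theorem pvStep_eq : pvStep = fun g e => g.modify e.1 [] (fun v => v ++ [e.2]) := rfl

-- A's nested loop is the fold of pvStep over the flattened event stream
theorem pv_groupsA_eq (l : List (String × List (String × List String))) :
    l.foldl
      (fun g p =>
        (pyGetExtension p.2).foldl (fun g tag => g.modify tag [] (fun v => v ++ [p.1])) g)
      PySem.Dict.empty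
    = (pvEventsA l).foldl pvStep PySem.Dict.empty := by
  rw [pvEventsA, List.foldl_flatMap]
  simp only [List.foldl_map, pvStep]

theorem pv_getD_foldl (E : List (String × String)) (t : String) :
    (E.foldl pvStep PySem.Dict.empty).getD t []
      = (E.filter (fun e => e.1 == t)).map (fun e => e.2) := by
  rw [pvStep_eq]
  rw [PySem.Dict.getD_foldl_modify_append]
  simp [PySem.Dict.getD_empty]

theorem pv_keys_foldl (E : List (String × String)) :
    (E.foldl pvStep PySem.Dict.empty).keys = PySem.Set.ofList (E.map (fun e => e.1)) := by
  rw [pvStep_eq]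
  rw [PySem.Dict.keys_foldl_modify_key E (fun e => e.1) [] (fun _ e => (fun v => v ++ [e.2]))]
  simp [PySem.Dict.keys_empty, PySem.Set.update_nil_left]

-- Python's sort of 2-tuples is the sort under the lexicographic product order
theorem pv_sorted2_eq {α κ₁ κ₂ : Type} [LinearOrder κ₁] [LinearOrder κ₂] (xs : List α)
    (k1 : α → κ₁) (k2 : α → κ₂) :
    PySem.List.sorted2 xs k1 k2
      = PySem.List.sorted xs (fun x => (toLex (k1 x, k2 x) : Lex (κ₁ × κ₂))) := by
  unfold PySem.List.sorted2 PySem.List.sorted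
  simp only [Bool.false_eq_true, if_false]
  congr 1
  funext acc x
  congr 1
  funext a b
  rcases lt_trichotomy (k1 a) (k1 b) with h|h|h
  · simp [Prod.Lex.toLex_lt_toLex, h]
  · simp [Prod.Lex.toLex_lt_toLex, h]
  · simp [Prod.Lex.toLex_lt_toLex, h, asymm h, ne_of_gt h]

-- in a (·≤·)-sorted list every element is at most the last one
theorem pv_le_getLast {l : List String} (h : l.Pairwise (· ≤ ·)) (hne : l ≠ []) :
    ∀ x ∈ l, x ≤ l.getLast hne := by
  intro x hx
  have hd := List.dropLast_append_getLast hne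
  rw [← hd] at h hx
  rcases List.mem_append.1 hx with h1 | h1
  · exact (List.pairwise_append.1 h).2.2 x h1 _ (List.mem_singleton_self _)
  · simp_all

theorem pv_dedup_sublist {α : Type} [BEq α] (xs : List α) :
    (PySem.List.dedup xs).Sublist xs := by
  induction xs using List.reverseRecOn with
  | nil => simp [PySem.List.dedup]
  | append_singleton ys y ih =>
      rw [PySem.List.dedup_eq_ofList] at *
      rw [PySem.Set.ofList_append_singleton]
      unfold PySem.Set.add
      split
      · exact ih.trans (List.sublist_append_left ys [y])
      · exact List.Sublist.append ih (List.Sublist.refl [y])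

-- the run-scan characterisation: on a stream whose keys are weakly increasing,
-- B's fold cuts the stream into the groups pvG describes
theorem pv_run_eq (L : List (String × String))
    (h : (L.map (fun e => e.1)).Pairwise (· ≤ ·)) :
    L.foldl pvRunStep [] = pvG L := by
  induction L using List.reverseRecOn with
  | nil => rfl
  | append_singleton M e ih =>
      rw [List.foldl_append]
      rw [List.map_append, List.pairwise_append] at h
      obtain ⟨hM, -, hle⟩ := h
      rw [ih hM]
      simp only [List.foldl_cons, List.foldl_nil]
      have hle' : ∀ k ∈ M.map (fun e => e.1), k ≤ e.1 := fun k hk =>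
        hle k hk e.1 (by simp)
      by_cases hMnil : M = []
      · subst hMnil
        simp [pvRunStep, pvG, PySem.List.dedup_eq_ofList, PySem.Set.ofList]
      · -- M nonempty
        have hkeysne : M.map (fun e => e.1) ≠ [] := by simpa using hMnil
        set keys := M.map (fun e => e.1) with hkeys
        set D := PySem.List.dedup keys with hD
        have hsub : D.Sublist keys := pv_dedup_sublist keys
        have hDpair : D.Pairwise (· ≤ ·) := hM.sublist hsub
        have hDnd : D.Nodup := PySem.List.nodup_dedup keys
        have hDne : D ≠ [] := by
          intro h0
          have : keys.getLast hkeysne ∈ D := (PySem.List.mem_dedup _ _).2 (List.getLast_mem _)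
          simp [h0] at this
        set klast := D.getLast hDne with hklast
        have hklast_mem : klast ∈ keys := (PySem.List.mem_dedup _ _).1 (List.getLast_mem _)
        have hGlast : (pvG M).getLast? = some (klast,
            ((M.filter (fun p => p.1 == klast)).map (fun p => p.2))) := by
          rw [pvG, List.getLast?_map, ← hkeys, ← hD]
          rw [List.getLast?_eq_some_getLast (l := D) (h := hDne)]
          simp [← hklast]
        have hdecomp : D.dropLast ++ [klast] = D := List.dropLast_append_getLast hDne
        have hdropmem : ∀ k ∈ D.dropLast, k ≠ klast := by
          intro k hk
          have := hdecomp ▸ hDnd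
          rw [List.nodup_append] at this
          exact fun hkk => this.2.2 k hk klast (by simp) (hkk)
        by_cases hmem : e.1 ∈ keys
        · -- e.1 is the (maximal) last key: extend the last run
          have h1 : e.1 ≤ klast := by
            have : e.1 ∈ D := (PySem.List.mem_dedup _ _).2 hmem
            exact pv_le_getLast hDpair hDne _ this
          have h2 : klast ≤ e.1 := hle' _ hklast_mem
          have heq : klast = e.1 := le_antisymm h2 h1
          rw [pvRunStep, hGlast]
          simp only [heq, beq_self_eq_true, if_true]
          -- target pvG (M ++ [e])
          have hdednew : PySem.List.dedup (keys ++ [e.1]) = D := by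
            rw [PySem.List.dedup_eq_ofList, PySem.Set.ofList_append_singleton]
            rw [← PySem.List.dedup_eq_ofList, ← hD]
            have hmemD : e.1 ∈ D := hD ▸ (PySem.List.mem_dedup _ _).2 hmem
            simp [PySem.Set.add, PySem.Set.contains, hmemD]
          conv_rhs => rw [pvG, List.map_append, List.map_cons, List.map_nil, ← hkeys, hdednew,
            ← hdecomp, List.map_append]
          rw [pvG, ← hkeys, ← hD]
          conv_lhs => rw [← hdecomp, List.map_append, List.map_cons, List.map_nil, List.dropLast_concat]
          congr 1
          · apply List.map_congr_left
            intro k hk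
            have hne1 : (e.1 == k) = false := beq_false_of_ne (fun hk1 => hdropmem k hk (heq ▸ hk1.symm))
            rw [List.filter_append]
            simp [hne1]
          · simp [List.filter_append, heq]
        · -- e.1 is a fresh key: a new run starts
          have hkne : (klast == e.1) = false :=
            beq_false_of_ne (fun hk => hmem (hk ▸ hklast_mem))
          rw [pvRunStep, hGlast]
          simp only [hkne, Bool.false_eq_true, if_false]
          have hdednew : PySem.List.dedup (keys ++ [e.1]) = D ++ [e.1] := by
            rw [PySem.List.dedup_eq_ofList, PySem.Set.ofList_append_singleton]
            rw [← PySem.List.dedup_eq_ofList, ← hD]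
            have hmemD : e.1 ∉ D := fun hc => hmem ((PySem.List.mem_dedup _ _).1 (hD ▸ hc))
            simp [PySem.Set.add, PySem.Set.contains, hmemD]
          conv_rhs => rw [pvG, List.map_append, List.map_cons, List.map_nil, ← hkeys, hdednew,
            List.map_append]
          rw [pvG, ← hkeys, ← hD]
          congr 1
          · apply List.map_congr_left
            intro k hk
            have hkk : k ∈ keys := (PySem.List.mem_dedup _ _).1 (hD ▸ hk)
            have hne1 : (e.1 == k) = false := beq_false_of_ne (fun hk1 => hmem (hk1 ▸ hkk))
            rw [List.filter_append]
            simp [hne1]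
          · have hfil : M.filter (fun p => p.1 == e.1) = [] := by
              rw [List.filter_eq_nil_iff]
              intro p hp hc
              have : p.1 ∈ keys := List.mem_map_of_mem hp
              exact hmem (eq_of_beq hc ▸ this)
            simp [List.filter_append, hfil]

-- B's port, with its pieces named: pairs is pvEventsA, the fold body is pvRunStep
theorem pv_alt_eq (l : List (String × List (String × List String))) :
    group_by_raw_tag_alt l
      = (PySem.Dict.ofList
          ((PySem.List.sorted2 (pvEventsA l) (fun e => e.1) (fun e => e.2)).foldl pvRunStep [])).items := rfl

theorem pv_main (l : List (String × List (String × List String))) :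
    group_by_raw_tag l = group_by_raw_tag_alt l := by
  set EA := pvEventsA l with hEA
  set KA := PySem.Set.ofList (EA.map (fun e => e.1)) with hKA
  set h : String → String × List String :=
    (fun k => (k, PySem.List.sorted (pvValA l k) (fun x => x))) with hh
  set C : List (String × List String) :=
    (PySem.List.sorted KA (fun x => x)).map h with hC
  have hKAnd : KA.Nodup := PySem.Set.nodup_ofList _
  have hCpair : C.Pairwise (fun a b => a.1 < b.1) := by
    rw [hC, List.pairwise_map]
    exact PySem.List.sorted_ofList_pairwise_lt _
  -- ===== A's side: A returns C =====
  have hA : group_by_raw_tag l = C := by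
    rw [group_by_raw_tag]
    rw [pv_groupsA_eq l]
    have hGk : ((pvEventsA l).foldl pvStep PySem.Dict.empty).keys = KA := pv_keys_foldl _
    have hGnd : ((pvEventsA l).foldl pvStep PySem.Dict.empty).keys.Nodup := by rw [hGk]; exact hKAnd
    rw [PySem.Dict.items_eq_map_keys _ hGnd []]
    rw [hGk, List.map_map]
    have : ((fun kv : String × List String => (kv.1, PySem.List.sorted kv.2 (fun x => x))) ∘
        fun k => (k, ((pvEventsA l).foldl pvStep PySem.Dict.empty).getD k [])) = h := by
      funext k
      simp only [Function.comp, hh, pv_getD_foldl]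
      rfl
    rw [this]
    exact PySem.List.sorted_eq_of_perm_of_pairwise_lt _ _ _
      ((PySem.List.sorted_perm KA (fun x => x) false).map h) hCpair
  -- ===== B's side: B returns C too =====
  have hB : group_by_raw_tag_alt l = C := by
    rw [pv_alt_eq, ← hEA, pv_sorted2_eq]
    set S := PySem.List.sorted EA (fun x => (toLex (x.1, x.2) : Lex (String × String))) with hS
    have hSperm : S.Perm EA := PySem.List.sorted_perm _ _ _
    have hSpair : S.Pairwise (fun a b =>
        (toLex (a.1, a.2) : Lex (String × String)) ≤ toLex (b.1, b.2)) :=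
      PySem.List.sorted_pairwise _ _
    have hSfst : (S.map (fun e => e.1)).Pairwise (· ≤ ·) := by
      rw [List.pairwise_map]
      refine hSpair.imp ?_
      intro a b hab
      rcases Prod.Lex.toLex_le_toLex.1 hab with h1 | ⟨h1, -⟩
      · exact le_of_lt h1
      · exact le_of_eq h1
    rw [pv_run_eq S hSfst]
    -- dict(runs): the run keys are distinct, so items is the run list itself
    have hfst : (pvG S).map (fun p => p.1) = PySem.List.dedup (S.map (fun e => e.1)) := by
      rw [pvG, List.map_map]
      exact List.map_id _
    have hitems : (PySem.Dict.ofList (pvG S)).items = pvG S := by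
      show (PySem.Dict.empty.update (pvG S)).items = pvG S
      rw [PySem.Dict.update]
      rw [PySem.Dict.items_foldl_insert_fresh (pvG S) (fun p => p.1) (fun p => p.2)
        PySem.Dict.empty (fun a _ => PySem.Dict.contains_empty _)
        (hfst ▸ PySem.List.nodup_dedup _)]
      simp [PySem.Dict.empty]
    rw [hitems]
    -- the distinct run keys, in order, are exactly sorted(groups.keys())
    have hkeys : PySem.List.dedup (S.map (fun e => e.1)) = PySem.List.sorted KA (fun x => x) := by
      symm
      apply PySem.List.sorted_eq_of_perm_of_pairwise_lt
      · rw [List.perm_ext_iff_of_nodup (PySem.List.nodup_dedup _) hKAnd]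
        intro a
        rw [PySem.List.mem_dedup, hKA, PySem.Set.mem_ofList, (hSperm.map _).mem_iff]
      · have hle : (PySem.List.dedup (S.map (fun e => e.1))).Pairwise (· ≤ ·) :=
          hSfst.sublist (pv_dedup_sublist _)
        have hne : (PySem.List.dedup (S.map (fun e => e.1))).Pairwise (· ≠ ·) :=
          PySem.List.nodup_dedup _
        exact (hle.and hne).imp (fun hab => lt_of_le_of_ne hab.1 hab.2)
    -- and each run is exactly that key's sorted mnemonic list
    have hval : ∀ k, (S.filter (fun e => e.1 == k)).map (fun e => e.2)
        = PySem.List.sorted (pvValA l k) (fun x => x) := by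
      intro k
      symm
      apply PySem.List.sorted_id_eq_of_perm_of_pairwise
      · exact (hSperm.filter _).map _
      · rw [List.pairwise_map]
        refine List.Pairwise.imp_of_mem ?_ (hSpair.sublist List.filter_sublist)
        intro a b ha hb hab
        have ha1 : a.1 = k := eq_of_beq (List.mem_filter.1 ha).2
        have hb1 : b.1 = k := eq_of_beq (List.mem_filter.1 hb).2
        rcases Prod.Lex.toLex_le_toLex.1 hab with h1 | ⟨-, h2⟩
        · exact absurd (ha1.trans hb1.symm) (ne_of_lt h1)
        · exact h2
    rw [pvG, hkeys]
    apply List.map_congr_left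
    intro k hk
    rw [hval k, hh]
  rw [hA, hB]

-- ===== VERDICT (by name: the statement is the Claim_ definition above) =====
theorem group_by_raw_tag_spec : Claim_equal_group_by_raw_tag := by
  intro l _
  exact pv_main l
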